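-- pv_equiv track=rewrite | github.com/caperaven/ui_testing_service | process_api/expressions/sanitize.py | tokens_to_condition
-- ===== SOURCE A (Python) =====
-- VALUE = 1
--
-- IGNORED_TOKENS = ["}", "{", "$", "utf-8", "."]
--
-- OPERATORS = {
--     "eq": " == ",
--     "ne": " != ",
--     "gt": " > ",
--     "ge": " >= ",
--     "lt": " < ",
--     "le": " <= ",
--     "and": " and ",
--     "or": " or ",
--     "not": " not "
-- }
--
-- PREFIXES = {
--     "c": "context",
--     "i": "item",
--     "d": "process.data",
--     "p": "process.parameters"
-- }
--
-- def tokens_to_condition(tokens):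
--     expr = []
--     prev_token = None
--     next_token = None
--
--     count = len(tokens)
--     is_path = False
--
--     for i in range(0, count):
--         # get current token
--         current_token = tokens[i]
--
--         value = current_token[VALUE]
--
--         # ignore tokens that are not relevant
--         if value in IGNORED_TOKENS:
--             if value == "}":
--                 is_path = False
--             continue
--
--         # if value is an operator, append the corresponding python operator
--         if value in OPERATORS:
--             expr.append(OPERATORS[value])
--             continue
--
--         # get previous token if exists
--         if i > 0:
--             prev_token = tokens[i - 1]
--
--         # get next token if exists
--         if i < count - 1:
--             next_token = tokens[i + 1]
--
--         # the current token presents a prefix for either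
--         # 1. context - $c{...}
--         # 2. item - $i{...}
--         # 3. data - $d{...}
--         # 4. parameters - $p{...}
--         if (prev_token and prev_token[VALUE] == "$") and (next_token and next_token[VALUE] == "{"):
--             prefix = PREFIXES.get(value, None)
--             if prefix:
--                 expr.append(prefix)
--
--             is_path = True
--             continue
--
--         if is_path:
--             expr.append(f"['{value}']")
--         else:
--             expr.append(value)
--
--     return "".join(expr)
-- ===== SOURCE B (Python) =====
-- VALUE = 1
--
-- IGNORED_TOKENS = ["}", "{", "$", "utf-8", "."]
--
-- OPERATORS = {
--     "eq": " == ",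
--     "ne": " != ",
--     "gt": " > ",
--     "ge": " >= ",
--     "lt": " < ",
--     "le": " <= ",
--     "and": " and ",
--     "or": " or ",
--     "not": " not "
-- }
--
-- PREFIXES = {
--     "c": "context",
--     "i": "item",
--     "d": "process.data",
--     "p": "process.parameters"
-- }
--
--
-- def tokens_to_condition(tokens):
--     # Index-driven scan: a '$' marker drives group consumption ($X{ -> prefix),
--     # instead of every token peeking at its neighbours.
--     parts = []
--     is_path = False
--     n = len(tokens)
--     i = 0
--     while i < n:
--         value = tokens[i][VALUE]
--         if value == "$":
--             if i + 2 < n: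
--                 letter = tokens[i + 1][VALUE]
--                 if (letter not in IGNORED_TOKENS and letter not in OPERATORS
--                         and tokens[i + 2][VALUE] == "{"):
--                     prefix = PREFIXES.get(letter)
--                     if prefix is not None:
--                         parts.append(prefix)
--                     is_path = True
--                     i += 3
--                     continue
--             i += 1
--             continue
--         if value in IGNORED_TOKENS:
--             if value == "}":
--                 is_path = False
--             i += 1
--             continue
--         if value in OPERATORS:
--             parts.append(OPERATORS[value])
--             i += 1
--             continue
--         parts.append(f"['{value}']" if is_path else value)
--         i += 1
--     return "".join(parts)
-- ===== Notes on version B (the rewrite author's own statement) =====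
-- stated objective: alternative
-- what changed: Replaces A's per-token prev/next peeking (persistent prev_token/next_token loop variables) by a '$'-marker-driven index scan that consumes a $X{ group in one step, so the lookahead state disappears.
-- intended difference: On inputs whose last token is a plain word directly preceded by a '$' but with no '{' after it, while the next_token variable left over from the last earlier plain token happens to hold '{', A's stale lookahead spuriously fires the prefix branch and drops the word (or replaces it by a prefix name), e.g. A returns 'c' on values ['c','{','$','x'] where B returns 'cx'; B treats the word as an ordinary token, the intended value since no ${...} group is opened there. — e.g. on tokens_to_condition([["t", "c"], ["t", "{"], ["t", "$"], ["t", "x"]]): A returns "c", B returns "cx"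
import Mathlib
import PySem

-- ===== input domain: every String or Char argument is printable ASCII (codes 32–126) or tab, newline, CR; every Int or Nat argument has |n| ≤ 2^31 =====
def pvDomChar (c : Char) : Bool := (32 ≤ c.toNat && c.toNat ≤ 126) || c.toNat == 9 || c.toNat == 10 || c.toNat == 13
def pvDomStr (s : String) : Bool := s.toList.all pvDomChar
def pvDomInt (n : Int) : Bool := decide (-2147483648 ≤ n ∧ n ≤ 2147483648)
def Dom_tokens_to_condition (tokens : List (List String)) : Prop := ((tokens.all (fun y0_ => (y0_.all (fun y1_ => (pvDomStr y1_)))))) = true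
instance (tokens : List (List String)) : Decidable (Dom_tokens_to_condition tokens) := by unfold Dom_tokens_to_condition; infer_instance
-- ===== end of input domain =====

-- B replaces A's per-token prev/next peeking by a '$'-marker-driven index scan (same O(n) cost, no
-- prev/next state); on the stale-lookahead corner described at D_ below, B returns the intended value.

-- ===== PORT A =====
-- IGNORED_TOKENS membership (five literals)
def pvIgn (v : String) : Bool := v == "}" || v == "{" || v == "$" || v == "utf-8" || v == "."
-- OPERATORS dict lookup (literal distinct keys, so an if-chain is the lookup)
def pvOp? (v : String) : Option String :=
  if v == "eq" then some " == " else if v == "ne" then some " != "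
  else if v == "gt" then some " > " else if v == "ge" then some " >= "
  else if v == "lt" then some " < " else if v == "le" then some " <= "
  else if v == "and" then some " and " else if v == "or" then some " or "
  else if v == "not" then some " not " else none
-- PREFIXES.get(value, None)
def pvPrefix? (v : String) : Option String :=
  if v == "c" then some "context" else if v == "i" then some "item"
  else if v == "d" then some "process.data" else if v == "p" then some "process.parameters" else none
-- tokens[i][VALUE] (VALUE = 1); the defaults are never read on inputs admitted by Pre_ (index 1 in range)
def pvTok (tokens : List (List String)) (i : Nat) : String := (tokens.getD i []).getD 1 ""
-- the two local variables of A's loop body: 'if i > 0: prev_token = tokens[i-1]',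
-- 'if i < count - 1: next_token = tokens[i+1]' ('i < count - 1' = 'i + 1 < count' on the reachable i)
def pvPrevT (tokens : List (List String)) (i : Nat) (p : Option (List String)) : Option (List String) :=
  if 0 < i then some (tokens.getD (i - 1) []) else p
def pvNextT (tokens : List (List String)) (i : Nat) (nx : Option (List String)) : Option (List String) :=
  if i + 1 < tokens.length then some (tokens.getD (i + 1) []) else nx
-- '(prev_token and prev_token[VALUE] == "$") and (next_token and next_token[VALUE] == "{")':
-- a None or empty-list token is falsy, and an empty list also has no element 1, so
-- '.elim false (·.getD 1 "" == …)' matches Python exactly there.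
def pvCond (tokens : List (List String)) (i : Nat) (p nx : Option (List String)) : Bool :=
  ((pvPrevT tokens i p).elim false fun q => q.getD 1 "" == "$") &&
  ((pvNextT tokens i nx).elim false fun q => q.getD 1 "" == "{")

-- A's for-loop over i, carrying prev_token, next_token, is_path and emitting expr in order.
-- The loop runs exactly (len tokens) iterations, so fuel = len tokens drives the structural recursion.
def pvLoopA (tokens : List (List String)) : Nat → Nat → Option (List String) → Option (List String) → Bool → List String
  | 0, _, _, _, _ => []
  | gas + 1, i, prevT, nextT, isPath =>
    if i < tokens.length then
      if pvIgn (pvTok tokens i) then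
        pvLoopA tokens gas (i + 1) prevT nextT (if pvTok tokens i == "}" then false else isPath)
      else
        match pvOp? (pvTok tokens i) with
        | some op => op :: pvLoopA tokens gas (i + 1) prevT nextT isPath
        | none =>
          if pvCond tokens i prevT nextT then
            (match pvPrefix? (pvTok tokens i) with | some pre => [pre] | none => []) ++
              pvLoopA tokens gas (i + 1) (pvPrevT tokens i prevT) (pvNextT tokens i nextT) true
          else
            (if isPath then "['" ++ pvTok tokens i ++ "']" else pvTok tokens i) ::
              pvLoopA tokens gas (i + 1) (pvPrevT tokens i prevT) (pvNextT tokens i nextT) isPath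
    else []

def tokens_to_condition (tokens : List (List String)) : String :=
  PySem.Str.join "" (pvLoopA tokens tokens.length 0 none none false)

-- ===== PORT B =====
-- B's while-loop: a '$' marker drives group consumption ($X{ → prefix, jump past the group);
-- it advances i by 1 or 3 within at most (len tokens) steps, so fuel = len tokens again.
def pvLoopB (tokens : List (List String)) : Nat → Nat → Bool → List String
  | 0, _, _ => []
  | gas + 1, i, isPath =>
    if i < tokens.length then
      if pvTok tokens i == "$" then
        if i + 2 < tokens.length then
          if !pvIgn (pvTok tokens (i + 1)) && (pvOp? (pvTok tokens (i + 1))).isNone &&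
              (pvTok tokens (i + 2) == "{") then
            (match pvPrefix? (pvTok tokens (i + 1)) with | some pre => [pre] | none => []) ++
              pvLoopB tokens gas (i + 3) true
          else pvLoopB tokens gas (i + 1) isPath
        else pvLoopB tokens gas (i + 1) isPath
      else if pvIgn (pvTok tokens i) then
        pvLoopB tokens gas (i + 1) (if pvTok tokens i == "}" then false else isPath)
      else
        match pvOp? (pvTok tokens i) with
        | some op => op :: pvLoopB tokens gas (i + 1) isPath
        | none => (if isPath then "['" ++ pvTok tokens i ++ "']" else pvTok tokens i) :: pvLoopB tokens gas (i + 1) isPath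
    else []

def tokens_to_condition_alt (tokens : List (List String)) : String :=
  PySem.Str.join "" (pvLoopB tokens tokens.length 0 false)

-- ===== PRECONDITION & SPEC =====
-- Pre_ excludes exactly the inputs where Python raises: tokens[i][1] is an IndexError on a token
-- with fewer than 2 elements (both A and B raise there).
def Pre_tokens_to_condition (tokens : List (List String)) : Prop := ∀ t ∈ tokens, 2 ≤ t.length
instance (tokens : List (List String)) : Decidable (Pre_tokens_to_condition tokens) := by
  unfold Pre_tokens_to_condition; infer_instance

def pvWitness_tokens_to_condition : List (List String) := [["t", "x"], ["t", "eq"], ["t", "5"]]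

-- a word token: kept as an operand (neither ignored punctuation nor an operator key)
def pvWordB (v : String) : Bool :=
  decide (v ∉ (["}", "{", "$", "utf-8", "."] : List String)) &&
  decide (v ∉ (["eq", "ne", "gt", "ge", "lt", "le", "and", "or", "not"] : List String))
-- the VALUE (element 1) of every token, in order
def pvVals (tokens : List (List String)) : List String := tokens.map (fun t => t.getD 1 "")
-- the value following the last word among the values before the last token (one linear scan)
def pvStep2 (acc : Option String) (p : String × String) : Option String :=
  if pvWordB p.1 then some p.2 else acc
def pvStaleVal (tokens : List (List String)) : Option String :=
  ((pvVals tokens).zip (pvVals tokens).tail).foldl pvStep2 none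
-- whether the last token lies inside an open $X{… group ('}' closes it; one linear scan)
def pvStep3 (st : Bool) (q : (String × String) × String) : Bool :=
  if q.1.2 = "}" then false
  else if q.1.1 = "$" ∧ pvWordB q.1.2 = true ∧ q.2 = "{" then true
  else st
def pvPathEndB (tokens : List (List String)) : Bool :=
  (((pvVals tokens).zip (pvVals tokens).tail).zip (pvVals tokens).tail.tail).foldl pvStep3 false

-- On inputs whose last token is a word directly preceded by a '$' but with no '{' after it,
-- while the last earlier word token is immediately followed by a '{' (so A's leftover next_token
-- variable holds that '{'), A's stale lookahead spuriously fires the prefix branch (dropping the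
-- word or replacing it by a prefix name); B emits the word as an ordinary token, the intended
-- value since no ${...} group is opened there.  (The last disjunct: either the word is nonempty,
-- or the last token lies inside an open $X{ group, so that the two outputs really differ.)
def D_tokens_to_condition (tokens : List (List String)) : Prop :=
  2 ≤ tokens.length ∧
  pvWordB (pvTok tokens (tokens.length - 1)) = true ∧
  pvTok tokens (tokens.length - 2) = "$" ∧
  pvStaleVal tokens = some "{" ∧
  (pvTok tokens (tokens.length - 1) ≠ "" ∨ pvPathEndB tokens = true)
instance (tokens : List (List String)) : Decidable (D_tokens_to_condition tokens) := by
  unfold D_tokens_to_condition; infer_instance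

def Spec_tokens_to_condition (tokens : List (List String)) (out : String) : Prop :=
  ¬ D_tokens_to_condition tokens → out = tokens_to_condition_alt tokens
instance (tokens : List (List String)) (out : String) : Decidable (Spec_tokens_to_condition tokens out) := by
  unfold Spec_tokens_to_condition; infer_instance

def pvDiffWitness_tokens_to_condition : List (List String) := [["t", "c"], ["t", "{"], ["t", "$"], ["t", "x"]]
def pvDiffWitnessOut_tokens_to_condition : String × String := ("c", "cx")

-- ===== CLAIM (what is proved, stated in full; the proofs are below) =====
def Claim_unchanged_tokens_to_condition : Prop := ∀ (tokens : List (List String)), Dom_tokens_to_condition tokens → Pre_tokens_to_condition tokens → Spec_tokens_to_condition tokens (tokens_to_condition tokens)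
def Claim_changed_tokens_to_condition : Prop := Dom_tokens_to_condition (pvDiffWitness_tokens_to_condition) ∧ Pre_tokens_to_condition (pvDiffWitness_tokens_to_condition) ∧ D_tokens_to_condition (pvDiffWitness_tokens_to_condition) ∧ tokens_to_condition (pvDiffWitness_tokens_to_condition) = pvDiffWitnessOut_tokens_to_condition.1 ∧ tokens_to_condition_alt (pvDiffWitness_tokens_to_condition) = pvDiffWitnessOut_tokens_to_condition.2 ∧ pvDiffWitnessOut_tokens_to_condition.1 ≠ pvDiffWitnessOut_tokens_to_condition.2
def Claim_exact_tokens_to_condition : Prop := ∀ (tokens : List (List String)), Dom_tokens_to_condition tokens → Pre_tokens_to_condition tokens → D_tokens_to_condition tokens → tokens_to_condition tokens ≠ tokens_to_condition_alt tokens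

-- ===== LEMMAS AND PROOFS =====

-- character-level view of "".join(parts)
def pvJ (l : List String) : List Char := (l.map String.toList).flatten

lemma pvJ_cons (x : String) (l : List String) : pvJ (x :: l) = x.toList ++ pvJ l := by
  simp [pvJ]
lemma pvJ_append (l₁ l₂ : List String) : pvJ (l₁ ++ l₂) = pvJ l₁ ++ pvJ l₂ := by
  simp [pvJ]

lemma pvChars_join_nil (ls : List (List Char)) : PySem.Chars.join [] ls = ls.flatten := by
  induction ls with
  | nil => simp [PySem.Chars.join_nil]
  | cons a t ih =>
    cases t with
    | nil => simp [PySem.Chars.join_singleton]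
    | cons b t2 => rw [PySem.Chars.join_cons_cons]; simp_all

lemma pvJoin_eq (l : List String) : PySem.Str.join "" l = String.ofList (pvJ l) := by
  simp [PySem.Str.join, pvChars_join_nil, pvJ]

-- operational helpers for the proofs (A's stale next_token and is_path, as functions of the input)
def pvPlain (v : String) : Bool := !pvIgn v && (pvOp? v).isNone
def pvStale (tokens : List (List String)) (i : Nat) : Option (List String) :=
  (List.range i).foldl
    (fun acc j =>
      if pvPlain (pvTok tokens j) && decide (j + 1 < tokens.length) then some (tokens.getD (j + 1) []) else acc)
    none
def pvPathA (tokens : List (List String)) : Nat → Bool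
  | 0 => false
  | k + 1 =>
    if pvIgn (pvTok tokens k) then (if pvTok tokens k == "}" then false else pvPathA tokens k)
    else if (pvOp? (pvTok tokens k)).isSome then pvPathA tokens k
    else if decide (0 < k) && (pvTok tokens (k - 1) == "$") && decide (k + 1 < tokens.length) &&
        (pvTok tokens (k + 1) == "{") then true
    else pvPathA tokens k
def pvLastFireB (tokens : List (List String)) : Bool :=
  decide (2 ≤ tokens.length) && pvPlain (pvTok tokens (tokens.length - 1)) &&
  (pvTok tokens (tokens.length - 2) == "$") &&
  ((pvStale tokens (tokens.length - 1)).elim false fun t => t.getD 1 "" == "{")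

-- what A appends at the stale-firing last index / what B appends there
def pvEndA (tokens : List (List String)) : List Char :=
  pvJ (match pvPrefix? (pvTok tokens (tokens.length - 1)) with | some pre => [pre] | none => [])
def pvEndB (tokens : List (List String)) : List Char :=
  (if pvPathA tokens (tokens.length - 1) then "['" ++ pvTok tokens (tokens.length - 1) ++ "']"
   else pvTok tokens (tokens.length - 1)).toList

lemma pvStale_succ (tokens : List (List String)) (i : Nat) :
    pvStale tokens (i + 1) =
      if pvPlain (pvTok tokens i) && decide (i + 1 < tokens.length) then some (tokens.getD (i + 1) [])
      else pvStale tokens i := by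
  simp [pvStale, List.range_succ]

-- components of pvLastFireB
lemma pvLF_parts (tokens : List (List String)) (h : pvLastFireB tokens = true) :
    2 ≤ tokens.length ∧ pvPlain (pvTok tokens (tokens.length - 1)) = true ∧
    pvTok tokens (tokens.length - 2) = "$" ∧
    ((pvStale tokens (tokens.length - 1)).elim false fun t => t.getD 1 "" == "{") = true := by
  simp [pvLastFireB] at h
  tauto

-- one-step evaluation lemmas for the two loops
lemma loopA_stop (tokens : List (List String)) (g i : Nat) (p nx : Option (List String)) (pa : Bool)
    (h : ¬ i < tokens.length) : pvLoopA tokens g i p nx pa = [] := by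
  cases g <;> simp [pvLoopA, h]

lemma loopA_ign (tokens : List (List String)) (g i : Nat) (p nx : Option (List String)) (pa : Bool)
    (hi : i < tokens.length) (hg : pvIgn (pvTok tokens i) = true) :
    pvLoopA tokens (g + 1) i p nx pa =
      pvLoopA tokens g (i + 1) p nx (if pvTok tokens i == "}" then false else pa) := by
  simp [pvLoopA, hi, hg]

lemma loopA_op (tokens : List (List String)) (g i : Nat) (p nx : Option (List String)) (pa : Bool)
    (op : String) (hi : i < tokens.length) (hg : pvIgn (pvTok tokens i) = false)
    (hop : pvOp? (pvTok tokens i) = some op) :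
    pvLoopA tokens (g + 1) i p nx pa = op :: pvLoopA tokens g (i + 1) p nx pa := by
  simp [pvLoopA, hi, hg, hop]

lemma loopA_fire (tokens : List (List String)) (g i : Nat) (p nx : Option (List String)) (pa : Bool)
    (hi : i < tokens.length) (hg : pvIgn (pvTok tokens i) = false)
    (hop : pvOp? (pvTok tokens i) = none) (hc : pvCond tokens i p nx = true) :
    pvLoopA tokens (g + 1) i p nx pa =
      (match pvPrefix? (pvTok tokens i) with | some pre => [pre] | none => []) ++
        pvLoopA tokens g (i + 1) (pvPrevT tokens i p) (pvNextT tokens i nx) true := by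
  simp [pvLoopA, hi, hg, hop, hc]

lemma loopA_nofire (tokens : List (List String)) (g i : Nat) (p nx : Option (List String)) (pa : Bool)
    (hi : i < tokens.length) (hg : pvIgn (pvTok tokens i) = false)
    (hop : pvOp? (pvTok tokens i) = none) (hc : pvCond tokens i p nx = false) :
    pvLoopA tokens (g + 1) i p nx pa =
      (if pa then "['" ++ pvTok tokens i ++ "']" else pvTok tokens i) ::
        pvLoopA tokens g (i + 1) (pvPrevT tokens i p) (pvNextT tokens i nx) pa := by
  simp [pvLoopA, hi, hg, hop, hc]

lemma loopB_stop (tokens : List (List String)) (g i : Nat) (pa : Bool)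
    (h : ¬ i < tokens.length) : pvLoopB tokens g i pa = [] := by
  cases g <;> simp [pvLoopB, h]

lemma loopB_group (tokens : List (List String)) (g i : Nat) (pa : Bool)
    (hi : i < tokens.length) (hv : pvTok tokens i = "$") (hg2 : i + 2 < tokens.length)
    (hl : pvPlain (pvTok tokens (i + 1)) = true) (hbr : pvTok tokens (i + 2) = "{") :
    pvLoopB tokens (g + 1) i pa =
      (match pvPrefix? (pvTok tokens (i + 1)) with | some pre => [pre] | none => []) ++
        pvLoopB tokens g (i + 3) true := by
  simp [pvPlain] at hl
  simp [pvLoopB, hi, hv, hg2, hl.1, hl.2, hbr]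

lemma loopB_dollar_skip (tokens : List (List String)) (g i : Nat) (pa : Bool)
    (hi : i < tokens.length) (hv : pvTok tokens i = "$")
    (hng : ¬(i + 2 < tokens.length ∧ pvPlain (pvTok tokens (i + 1)) = true ∧ pvTok tokens (i + 2) = "{")) :
    pvLoopB tokens (g + 1) i pa = pvLoopB tokens g (i + 1) pa := by
  by_cases hg2 : i + 2 < tokens.length
  · have : (!pvIgn (pvTok tokens (i + 1)) && (pvOp? (pvTok tokens (i + 1))).isNone &&
        (pvTok tokens (i + 2) == "{")) = false := by
      by_contra hcc
      rw [Bool.not_eq_false] at hcc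
      simp at hcc
      exact hng ⟨hg2, by simp [pvPlain, hcc.1.1, hcc.1.2], hcc.2⟩
    simp [pvLoopB, hi, hv, hg2, this]
  · simp [pvLoopB, hi, hv, hg2]

lemma loopB_ign (tokens : List (List String)) (g i : Nat) (pa : Bool)
    (hi : i < tokens.length) (hv : ¬ pvTok tokens i = "$") (hg : pvIgn (pvTok tokens i) = true) :
    pvLoopB tokens (g + 1) i pa =
      pvLoopB tokens g (i + 1) (if pvTok tokens i == "}" then false else pa) := by
  simp [pvLoopB, hi, hv, hg]

lemma loopB_op (tokens : List (List String)) (g i : Nat) (pa : Bool) (op : String)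
    (hi : i < tokens.length) (hg : pvIgn (pvTok tokens i) = false)
    (hop : pvOp? (pvTok tokens i) = some op) :
    pvLoopB tokens (g + 1) i pa = op :: pvLoopB tokens g (i + 1) pa := by
  have hv : ¬ pvTok tokens i = "$" := by
    intro h; rw [h] at hg; simp [pvIgn] at hg
  simp [pvLoopB, hi, hv, hg, hop]

lemma loopB_plain (tokens : List (List String)) (g i : Nat) (pa : Bool)
    (hi : i < tokens.length) (hg : pvIgn (pvTok tokens i) = false)
    (hop : pvOp? (pvTok tokens i) = none) :
    pvLoopB tokens (g + 1) i pa =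
      (if pa then "['" ++ pvTok tokens i ++ "']" else pvTok tokens i) :: pvLoopB tokens g (i + 1) pa := by
  have hv : ¬ pvTok tokens i = "$" := by
    intro h; rw [h] at hg; simp [pvIgn] at hg
  simp [pvLoopB, hi, hv, hg, hop]

-- fuel irrelevance for A's loop (any fuel ≥ the remaining iterations gives the same list)
lemma loopA_fuel (tokens : List (List String)) :
    ∀ (g g' i : Nat) (p nx : Option (List String)) (pa : Bool),
      tokens.length - i ≤ g → tokens.length - i ≤ g' →
      pvLoopA tokens g i p nx pa = pvLoopA tokens g' i p nx pa := by
  intro g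
  induction g with
  | zero =>
    intro g' i p nx pa h1 _
    have hni : ¬ i < tokens.length := by omega
    rw [loopA_stop _ _ _ _ _ _ hni, loopA_stop _ _ _ _ _ _ hni]
  | succ g IH =>
    intro g' i p nx pa h1 h2
    by_cases hi : i < tokens.length
    · cases g' with
      | zero => omega
      | succ g'' =>
        by_cases hg : pvIgn (pvTok tokens i) = true
        · rw [loopA_ign _ _ _ _ _ _ hi hg, loopA_ign _ _ _ _ _ _ hi hg]
          exact IH g'' (i + 1) _ _ _ (by omega) (by omega)
        · rw [Bool.not_eq_true] at hg
          cases hop : pvOp? (pvTok tokens i) with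
          | some op =>
            rw [loopA_op _ _ _ _ _ _ _ hi hg hop, loopA_op _ _ _ _ _ _ _ hi hg hop]
            exact congrArg _ (IH g'' (i + 1) _ _ _ (by omega) (by omega))
          | none =>
            cases hc : pvCond tokens i p nx with
            | true =>
              rw [loopA_fire _ _ _ _ _ _ hi hg hop hc, loopA_fire _ _ _ _ _ _ hi hg hop hc]
              exact congrArg _ (IH g'' (i + 1) _ _ _ (by omega) (by omega))
            | false =>
              rw [loopA_nofire _ _ _ _ _ _ hi hg hop hc, loopA_nofire _ _ _ _ _ _ hi hg hop hc]
              exact congrArg _ (IH g'' (i + 1) _ _ _ (by omega) (by omega))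
    · rw [loopA_stop _ _ _ _ _ _ hi, loopA_stop _ _ _ _ _ _ hi]

-- lifting a common emitted head over the simulation conclusion
lemma pvStepLift (tokens : List (List String)) (hd lA' lB' : List String) (i i' : Nat)
    (hi : i < tokens.length)
    (hlt : pvLastFireB tokens = true → i' < tokens.length)
    (h' : if pvLastFireB tokens = true ∧ i' < tokens.length then
            ∃ s, pvJ lA' = s ++ pvEndA tokens ∧ pvJ lB' = s ++ pvEndB tokens
          else pvJ lA' = pvJ lB') :
    (if pvLastFireB tokens = true ∧ i < tokens.length then
       ∃ s, pvJ (hd ++ lA') = s ++ pvEndA tokens ∧ pvJ (hd ++ lB') = s ++ pvEndB tokens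
     else pvJ (hd ++ lA') = pvJ (hd ++ lB')) := by
  by_cases hLF : pvLastFireB tokens = true
  · rw [if_pos ⟨hLF, hi⟩]
    rw [if_pos ⟨hLF, hlt hLF⟩] at h'
    obtain ⟨s, hA, hB⟩ := h'
    exact ⟨pvJ hd ++ s, by rw [pvJ_append, hA, List.append_assoc],
           by rw [pvJ_append, hB, List.append_assoc]⟩
  · rw [if_neg (fun hc => hLF hc.1)]
    rw [if_neg (fun hc => hLF hc.1)] at h'
    rw [pvJ_append, pvJ_append, h']


lemma pvTok_eq (tokens : List (List String)) (j : Nat) :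
    (tokens.getD j []).getD 1 "" = pvTok tokens j := rfl

lemma pathA_ign (tokens : List (List String)) (k : Nat) (hg : pvIgn (pvTok tokens k) = true) :
    pvPathA tokens (k + 1) = if pvTok tokens k == "}" then false else pvPathA tokens k := by
  simp [pvPathA, hg]

lemma pathA_op (tokens : List (List String)) (k : Nat) (op : String)
    (hg : pvIgn (pvTok tokens k) = false) (hop : pvOp? (pvTok tokens k) = some op) :
    pvPathA tokens (k + 1) = pvPathA tokens k := by
  simp [pvPathA, hg, hop]

lemma pathA_plain (tokens : List (List String)) (k : Nat)
    (hg : pvIgn (pvTok tokens k) = false) (hop : pvOp? (pvTok tokens k) = none) :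
    pvPathA tokens (k + 1) =
      if decide (0 < k) && (pvTok tokens (k - 1) == "$") && decide (k + 1 < tokens.length) &&
          (pvTok tokens (k + 1) == "{") then true
      else pvPathA tokens k := by
  simp [pvPathA, hg, hop]

lemma pvStepLift0 (tokens : List (List String)) (lA' lB' : List String) (i i' : Nat)
    (hi : i < tokens.length)
    (hlt : pvLastFireB tokens = true → i' < tokens.length)
    (h' : if pvLastFireB tokens = true ∧ i' < tokens.length then
            ∃ s, pvJ lA' = s ++ pvEndA tokens ∧ pvJ lB' = s ++ pvEndB tokens
          else pvJ lA' = pvJ lB') :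
    (if pvLastFireB tokens = true ∧ i < tokens.length then
       ∃ s, pvJ lA' = s ++ pvEndA tokens ∧ pvJ lB' = s ++ pvEndB tokens
     else pvJ lA' = pvJ lB') := by
  by_cases hLF : pvLastFireB tokens = true
  · rw [if_pos ⟨hLF, hi⟩]; rw [if_pos ⟨hLF, hlt hLF⟩] at h'; exact h'
  · rw [if_neg (fun hc => hLF hc.1)]; rw [if_neg (fun hc => hLF hc.1)] at h'; exact h'

lemma pvStepLiftCons (tokens : List (List String)) (x : String) (lA' lB' : List String) (i i' : Nat)
    (hi : i < tokens.length)
    (hlt : pvLastFireB tokens = true → i' < tokens.length)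
    (h' : if pvLastFireB tokens = true ∧ i' < tokens.length then
            ∃ s, pvJ lA' = s ++ pvEndA tokens ∧ pvJ lB' = s ++ pvEndB tokens
          else pvJ lA' = pvJ lB') :
    (if pvLastFireB tokens = true ∧ i < tokens.length then
       ∃ s, pvJ (x :: lA') = s ++ pvEndA tokens ∧ pvJ (x :: lB') = s ++ pvEndB tokens
     else pvJ (x :: lA') = pvJ (x :: lB')) := by
  by_cases hLF : pvLastFireB tokens = true
  · rw [if_pos ⟨hLF, hi⟩]; rw [if_pos ⟨hLF, hlt hLF⟩] at h'
    obtain ⟨s, hA, hB⟩ := h'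
    exact ⟨x.toList ++ s, by rw [pvJ_cons, hA, List.append_assoc],
           by rw [pvJ_cons, hB, List.append_assoc]⟩
  · rw [if_neg (fun hc => hLF hc.1)]; rw [if_neg (fun hc => hLF hc.1)] at h'
    rw [pvJ_cons, pvJ_cons, h']

-- the main simulation lemma: from any loop state satisfying the invariants, the two loops produce
-- the same joined characters, except that when the stale lookahead fires at the last index A ends
-- with pvEndA where B ends with pvEndB.
lemma pvMain (tokens : List (List String)) :
    ∀ (gas i : Nat) (prevT nextT : Option (List String)) (path : Bool),
      tokens.length - i ≤ gas →
      (i = 0 → prevT = none) →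
      nextT = pvStale tokens i →
      (i < tokens.length → path = pvPathA tokens i) →
      (i = 0 ∨ ¬(pvTok tokens (i - 1) = "$" ∧ pvPlain (pvTok tokens i) = true ∧
                 i + 1 < tokens.length ∧ pvTok tokens (i + 1) = "{")) →
      (if pvLastFireB tokens = true ∧ i < tokens.length then
        ∃ s, pvJ (pvLoopA tokens gas i prevT nextT path) = s ++ pvEndA tokens ∧
             pvJ (pvLoopB tokens gas i path) = s ++ pvEndB tokens
      else pvJ (pvLoopA tokens gas i prevT nextT path) = pvJ (pvLoopB tokens gas i path)) := by
  intro gas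
  induction gas with
  | zero =>
    intro i prevT nextT path hgas hprev hnext hpath hreach
    have hni : ¬ i < tokens.length := by omega
    rw [if_neg (fun hc => hni hc.2), loopA_stop _ _ _ _ _ _ hni, loopB_stop _ _ _ _ hni]
  | succ g IH =>
    intro i prevT nextT path hgas hprev hnext hpath hreach
    by_cases hi : i < tokens.length
    case neg =>
      rw [if_neg (fun hc => hi hc.2), loopA_stop _ _ _ _ _ _ hi, loopB_stop _ _ _ _ hi]
    case pos =>
    have hpa := hpath hi
    by_cases hv : pvTok tokens i = "$"
    · -- '$': ignored by A, marker for B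
      have hg : pvIgn (pvTok tokens i) = true := by rw [hv]; rfl
      rw [loopA_ign _ _ _ _ _ _ hi hg,
          show (if pvTok tokens i == "}" then false else path) = path by simp [hv]]
      by_cases hgrp : i + 2 < tokens.length ∧ pvPlain (pvTok tokens (i + 1)) = true ∧
          pvTok tokens (i + 2) = "{"
      · -- group: A fires at the letter, B consumes $X{
        obtain ⟨hg2, hl, hbr⟩ := hgrp
        rw [loopB_group _ _ _ _ hi hv hg2 hl hbr]
        obtain ⟨g2, rfl⟩ : ∃ g2, g = g2 + 1 + 1 := ⟨g - 2, by omega⟩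
        have hi1 : i + 1 < tokens.length := by omega
        have hlg : pvIgn (pvTok tokens (i + 1)) = false := by
          have := hl; simp [pvPlain] at this; exact this.1
        have hlop : pvOp? (pvTok tokens (i + 1)) = none := by
          have := hl; simp [pvPlain] at this; exact this.2
        have hcond : pvCond tokens (i + 1) prevT nextT = true := by
          unfold pvCond pvPrevT pvNextT
          rw [if_pos (by omega : 0 < i + 1), if_pos (by omega : i + 1 + 1 < tokens.length)]
          simp only [Option.elim, Nat.add_sub_cancel, pvTok_eq]
          simp [hv, show pvTok tokens (i + 1 + 1) = "{" from hbr]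
        rw [loopA_fire _ _ _ _ _ _ hi1 hlg hlop hcond]
        have hg2i : pvIgn (pvTok tokens (i + 1 + 1)) = true := by
          rw [show pvTok tokens (i + 1 + 1) = "{" from hbr]; rfl
        rw [loopA_ign _ _ _ _ _ _ (by omega : i + 1 + 1 < tokens.length) hg2i,
            show (if pvTok tokens (i + 1 + 1) == "}" then false else true) = true by
              simp [show pvTok tokens (i + 1 + 1) = "{" from hbr],
            loopA_fuel tokens g2 (g2 + 1 + 1) (i + 1 + 1 + 1) _ _ _ (by omega) (by omega)]
        have hnext3 : pvNextT tokens (i + 1) nextT = pvStale tokens (i + 1 + 1 + 1) := by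
          have hb : i + 1 + 1 < tokens.length := by omega
          rw [pvStale_succ, pvStale_succ]
          simp [pvPlain, hg2i, hlg, hlop, pvNextT, hb]
        have hp3 : i + 1 + 1 + 1 < tokens.length → true = pvPathA tokens (i + 1 + 1 + 1) := by
          intro _
          rw [pathA_ign tokens (i + 1 + 1) hg2i,
              show (pvTok tokens (i + 1 + 1) == "}") = false by
                simp [show pvTok tokens (i + 1 + 1) = "{" from hbr],
              if_neg (by simp), pathA_plain tokens (i + 1) hlg hlop]
          simp [hv, hbr, show i + 1 + 1 < tokens.length from by omega]
        have hlt3 : pvLastFireB tokens = true → i + 1 + 1 + 1 < tokens.length := by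
          intro hLF
          obtain ⟨-, hplast, -, -⟩ := pvLF_parts tokens hLF
          have hne : i + 2 ≠ tokens.length - 1 := by
            intro he
            rw [← he, show pvTok tokens (i + 2) = "{" from hbr] at hplast
            simp [pvPlain, pvIgn] at hplast
          omega
        have hprev3 : i + 1 + 1 + 1 = 0 → pvPrevT tokens (i + 1) prevT = none :=
          fun h => absurd h (by omega)
        have hreach3 : i + 1 + 1 + 1 = 0 ∨
            ¬(pvTok tokens (i + 1 + 1 + 1 - 1) = "$" ∧
              pvPlain (pvTok tokens (i + 1 + 1 + 1)) = true ∧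
              i + 1 + 1 + 1 + 1 < tokens.length ∧ pvTok tokens (i + 1 + 1 + 1 + 1) = "{") := by
          right
          intro hcc
          rw [show i + 1 + 1 + 1 - 1 = i + 2 from by omega, hbr] at hcc
          exact absurd hcc.1 (by decide)
        exact pvStepLift tokens _ _ _ i (i + 1 + 1 + 1) hi hlt3
          (IH (i + 1 + 1 + 1) (pvPrevT tokens (i + 1) prevT) (pvNextT tokens (i + 1) nextT) true
            (by omega) hprev3 hnext3 hp3 hreach3)
      · -- bare '$': both just skip it
        rw [loopB_dollar_skip _ _ _ _ hi hv hgrp]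
        have hst : pvStale tokens (i + 1) = pvStale tokens i := by
          rw [pvStale_succ]; simp [pvPlain, hg]
        have hlt : pvLastFireB tokens = true → i + 1 < tokens.length := by
          intro hLF
          obtain ⟨-, hplast, -, -⟩ := pvLF_parts tokens hLF
          have : i ≠ tokens.length - 1 := by
            intro he
            rw [← he] at hplast
            simp [pvPlain, hg] at hplast
          omega
        exact pvStepLift0 tokens _ _ i (i + 1) hi hlt
          (IH (i + 1) prevT nextT path (by omega) (fun h => absurd h (by omega))
            (by rw [hst]; exact hnext)
            (fun _ => by rw [pathA_ign tokens i hg]; simp [hv]; exact hpa)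
            (Or.inr (fun hcc => hgrp ⟨hcc.2.2.1, hcc.2.1, hcc.2.2.2⟩)))
    · by_cases hgn : pvIgn (pvTok tokens i) = true
      · -- ignored, not '$'
        rw [loopA_ign _ _ _ _ _ _ hi hgn, loopB_ign _ _ _ _ hi hv hgn]
        have hst : pvStale tokens (i + 1) = pvStale tokens i := by
          rw [pvStale_succ]; simp [pvPlain, hgn]
        have hlt : pvLastFireB tokens = true → i + 1 < tokens.length := by
          intro hLF
          obtain ⟨-, hplast, -, -⟩ := pvLF_parts tokens hLF
          have : i ≠ tokens.length - 1 := by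
            intro he; rw [← he] at hplast; simp [pvPlain, hgn] at hplast
          omega
        have hpath' : i + 1 < tokens.length →
            (if pvTok tokens i == "}" then false else path) = pvPathA tokens (i + 1) := by
          intro _
          rw [pathA_ign tokens i hgn]
          by_cases hbr : (pvTok tokens i == "}") = true
          · simp [hbr]
          · simp only [Bool.not_eq_true] at hbr
            simp [hbr, hpa]
        exact pvStepLift0 tokens _ _ i (i + 1) hi hlt
          (IH (i + 1) prevT nextT _ (by omega) (fun h => absurd h (by omega))
            (by rw [hst]; exact hnext) hpath'
            (Or.inr (fun hcc => hv (by simpa using hcc.1))))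
      · rw [Bool.not_eq_true] at hgn
        have hv' : ¬ pvTok tokens i = "$" := hv
        cases hop : pvOp? (pvTok tokens i) with
        | some op =>
          rw [loopA_op _ _ _ _ _ _ _ hi hgn hop, loopB_op _ _ _ _ _ hi hgn hop]
          have hst : pvStale tokens (i + 1) = pvStale tokens i := by
            rw [pvStale_succ]; simp [pvPlain, hop]
          have hlt : pvLastFireB tokens = true → i + 1 < tokens.length := by
            intro hLF
            obtain ⟨-, hplast, -, -⟩ := pvLF_parts tokens hLF
            have : i ≠ tokens.length - 1 := by
              intro he; rw [← he] at hplast; simp [pvPlain, hop] at hplast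
            omega
          exact pvStepLiftCons tokens op _ _ i (i + 1) hi hlt
            (IH (i + 1) prevT nextT path (by omega) (fun h => absurd h (by omega))
              (by rw [hst]; exact hnext)
              (fun _ => by rw [pathA_op tokens i op hgn hop]; exact hpa)
              (Or.inr (fun hcc => hv' (by simpa using hcc.1))))
        | none =>
          have hplainv : pvPlain (pvTok tokens i) = true := by simp [pvPlain, hgn, hop]
          by_cases hi1 : i + 1 < tokens.length
          · -- plain token in the middle: the prefix branch cannot fire
            have hnd : 0 < i → ¬(pvTok tokens (i - 1) = "$" ∧ pvTok tokens (i + 1) = "{") := by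
              intro hpos hcc
              cases hreach with
              | inl h0 => omega
              | inr hnr => exact hnr ⟨hcc.1, hplainv, hi1, hcc.2⟩
            have hcond : pvCond tokens i prevT nextT = false := by
              unfold pvCond pvPrevT pvNextT
              cases Nat.eq_zero_or_pos i with
              | inl h0 => subst h0; rw [hprev rfl]; simp
              | inr hpos =>
                rw [if_pos hpos, if_pos hi1]
                simp only [Option.elim, pvTok_eq]
                by_cases hA : pvTok tokens (i - 1) = "$"
                · have hB : ¬ pvTok tokens (i + 1) = "{" := fun hB => (hnd hpos) ⟨hA, hB⟩
                  simp [hB]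
                · simp [hA]
            have hguard : pvPathA tokens (i + 1) = pvPathA tokens i := by
              rw [pathA_plain tokens i hgn hop]
              cases Nat.eq_zero_or_pos i with
              | inl h0 => subst h0; simp
              | inr hpos =>
                by_cases hA : pvTok tokens (i - 1) = "$"
                · have hB : ¬ pvTok tokens (i + 1) = "{" := fun hB => (hnd hpos) ⟨hA, hB⟩
                  simp [hB]
                · simp [hA]
            have hst : pvNextT tokens i nextT = pvStale tokens (i + 1) := by
              unfold pvNextT
              rw [if_pos hi1, pvStale_succ]
              simp [hplainv, hi1]
            rw [loopA_nofire _ _ _ _ _ _ hi hgn hop hcond, loopB_plain _ _ _ _ hi hgn hop]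
            exact pvStepLiftCons tokens _ _ _ i (i + 1) hi (fun _ => hi1)
              (IH (i + 1) (pvPrevT tokens i prevT) (pvNextT tokens i nextT) path (by omega)
                (fun h => absurd h (by omega)) hst
                (fun _ => by rw [hguard]; exact hpa)
                (Or.inr (fun hcc => hv' (by simpa using hcc.1))))
          · -- plain token at the very last index: next_token is stale here
            have hlast : i = tokens.length - 1 := by omega
            by_cases hLF : pvLastFireB tokens = true
            · -- the stale lookahead fires: A emits the prefix (or nothing), B the word
              obtain ⟨hn2, hplast, hprevd, hstale⟩ := pvLF_parts tokens hLF
              have hipos : 0 < i := by omega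
              have hcond : pvCond tokens i prevT nextT = true := by
                unfold pvCond pvPrevT pvNextT
                rw [if_pos hipos, if_neg hi1, hnext]
                simp only [Option.elim, pvTok_eq]
                rw [show i - 1 = tokens.length - 2 from by omega, hprevd, hlast]
                simpa using hstale
              rw [loopA_fire _ _ _ _ _ _ hi hgn hop hcond, loopB_plain _ _ _ _ hi hgn hop,
                  if_pos ⟨hLF, hi⟩]
              refine ⟨[], ?_, ?_⟩
              · rw [loopA_stop tokens g (i + 1) _ _ _ (by omega), pvJ_append, List.nil_append]
                unfold pvEndA
                rw [← hlast]
                simp [pvJ]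
              · rw [loopB_stop tokens g (i + 1) _ (by omega), pvJ_cons, List.nil_append]
                rw [hlast] at hpa
                unfold pvEndB
                rw [← hpa, ← hlast]
                simp [pvJ]
            · -- the stale lookahead does not fire: ordinary last emit on both sides
              have hcond : pvCond tokens i prevT nextT = false := by
                unfold pvCond pvPrevT pvNextT
                cases Nat.eq_zero_or_pos i with
                | inl h0 => subst h0; rw [hprev rfl]; simp
                | inr hpos =>
                  rw [if_pos hpos, if_neg hi1, hnext]
                  show ((tokens.getD (i - 1) []).getD 1 "" == "$" &&
                      (pvStale tokens i).elim false fun q => q.getD 1 "" == "{") = false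
                  rw [pvTok_eq]
                  by_cases hdol : (pvTok tokens (i - 1) == "$") = true
                  · by_cases hS : ((pvStale tokens i).elim false fun q => q.getD 1 "" == "{") = true
                    · exfalso
                      apply hLF
                      unfold pvLastFireB
                      rw [show tokens.length - 1 = i from by omega,
                          show tokens.length - 2 = i - 1 from by omega]
                      simp only [List.getD_eq_getElem?_getD] at hS
                      simp [show 2 ≤ tokens.length from by omega, hplainv, hdol, hS]
                    · rw [Bool.not_eq_true] at hS
                      simp only [List.getD_eq_getElem?_getD] at hS
                      simp [hS]
                  · rw [Bool.not_eq_true] at hdol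
                    simp [hdol]
              rw [loopA_nofire _ _ _ _ _ _ hi hgn hop hcond, loopB_plain _ _ _ _ hi hgn hop,
                  if_neg (fun hc => hLF hc.1),
                  loopA_stop tokens g (i + 1) _ _ _ (by omega), loopB_stop tokens g (i + 1) _ (by omega)]


lemma pvWordB_eq_plain (v : String) : pvWordB v = pvPlain v := by
  unfold pvWordB pvPlain pvIgn pvOp?
  split_ifs <;> simp_all [Bool.beq_eq_decide_eq, Bool.and_assoc]

lemma pvPairs_eq (tokens : List (List String)) :
    (pvVals tokens).zip (pvVals tokens).tail =
      (List.range (tokens.length - 1)).map (fun j => (pvTok tokens j, pvTok tokens (j + 1))) := by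
  apply List.ext_getElem
  · simp [pvVals]
  · intro j h1 h2
    have hj : j < tokens.length := by simp [pvVals] at h1; omega
    have hj1 : j + 1 < tokens.length := by simp [pvVals] at h1; omega
    simp [pvVals, List.getElem_zip, List.getElem_tail, pvTok, hj, hj1]

lemma pvTriples_eq (tokens : List (List String)) :
    ((pvVals tokens).zip (pvVals tokens).tail).zip (pvVals tokens).tail.tail =
      (List.range (tokens.length - 2)).map
        (fun j => ((pvTok tokens j, pvTok tokens (j + 1)), pvTok tokens (j + 2))) := by
  apply List.ext_getElem
  · simp [pvVals]
    omega
  · intro j h1 h2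
    have hj : j + 2 < tokens.length := by simp [pvVals] at h1; omega
    simp [pvVals, List.getElem_zip, List.getElem_tail, pvTok,
      show j < tokens.length from by omega, show j + 1 < tokens.length from by omega, hj]

lemma pvStaleVal_aux (tokens : List (List String)) :
    ∀ m, m < tokens.length →
      (List.range m).foldl (fun acc j => pvStep2 acc (pvTok tokens j, pvTok tokens (j + 1))) none =
        (pvStale tokens m).map (fun t => t.getD 1 "") := by
  intro m
  induction m with
  | zero => intro _; simp [pvStale]
  | succ m IH =>
    intro hm
    rw [List.range_succ, List.foldl_append, List.foldl_cons, List.foldl_nil, pvStale_succ,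
      IH (by omega)]
    unfold pvStep2
    by_cases hw : pvWordB (pvTok tokens m) = true
    · have hp : pvPlain (pvTok tokens m) = true := by rw [← pvWordB_eq_plain]; exact hw
      simp only [hw, if_pos, hp, show m + 1 < tokens.length from hm, decide_true, Bool.and_self,
        Option.map_some]
      rfl
    · rw [Bool.not_eq_true] at hw
      have hp : pvPlain (pvTok tokens m) = false := by rw [← pvWordB_eq_plain]; exact hw
      simp [hw, hp]

lemma pvStaleVal_brace (tokens : List (List String)) (hn : 1 ≤ tokens.length) :
    pvStaleVal tokens = some "{" ↔
      ((pvStale tokens (tokens.length - 1)).elim false fun t => t.getD 1 "" == "{") = true := by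
  unfold pvStaleVal
  rw [pvPairs_eq, List.foldl_map, pvStaleVal_aux tokens (tokens.length - 1) (by omega)]
  cases pvStale tokens (tokens.length - 1) with
  | none => simp
  | some t => simp

lemma pathA_one (tokens : List (List String)) : pvPathA tokens 1 = false := by
  by_cases hig : pvIgn (pvTok tokens 0) = true
  · rw [pathA_ign tokens 0 hig]
    split <;> simp [pvPathA]
  · rw [Bool.not_eq_true] at hig
    cases hop : pvOp? (pvTok tokens 0) with
    | some op => rw [pathA_op tokens 0 op hig hop]; simp [pvPathA]
    | none => rw [pathA_plain tokens 0 hig hop]; simp [pvPathA]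

lemma pvPathEnd_aux (tokens : List (List String)) :
    ∀ c, c ≤ tokens.length - 2 → 2 ≤ tokens.length →
      (List.range c).foldl
        (fun st j => pvStep3 st ((pvTok tokens j, pvTok tokens (j + 1)), pvTok tokens (j + 2)))
        false = pvPathA tokens (c + 1) := by
  intro c
  induction c with
  | zero => intro _ _; rw [pathA_one]; rfl
  | succ c IH =>
    intro hc hn
    rw [List.range_succ, List.foldl_append, List.foldl_cons, List.foldl_nil, IH (by omega) hn]
    unfold pvStep3
    have hkn : c + 1 + 1 < tokens.length := by omega
    by_cases hig : pvIgn (pvTok tokens (c + 1)) = true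
    · rw [pathA_ign tokens (c + 1) hig]
      have hwf : pvWordB (pvTok tokens (c + 1)) = false := by
        rw [pvWordB_eq_plain]; simp [pvPlain, hig]
      by_cases hbr : pvTok tokens (c + 1) = "}"
      · simp [hbr]
      · simp [hbr, hwf]
    · rw [Bool.not_eq_true] at hig
      have hbr : pvTok tokens (c + 1) ≠ "}" := by
        intro h; rw [h] at hig; simp [pvIgn] at hig
      cases hop : pvOp? (pvTok tokens (c + 1)) with
      | some op =>
        have hwf : pvWordB (pvTok tokens (c + 1)) = false := by
          rw [pvWordB_eq_plain]; simp [pvPlain, hop]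
        rw [pathA_op tokens (c + 1) op hig hop]
        simp [hbr, hwf]
      | none =>
        have hwt : pvWordB (pvTok tokens (c + 1)) = true := by
          rw [pvWordB_eq_plain]; simp [pvPlain, hig, hop]
        rw [pathA_plain tokens (c + 1) hig hop]
        simp only [Nat.add_sub_cancel]
        by_cases hd : pvTok tokens c = "$"
        · by_cases hnb : pvTok tokens (c + 1 + 1) = "{"
          · simp [hbr, hwt, hd, hnb, hkn]
          · simp [hbr, hwt, hd, hnb]
        · simp [hbr, hwt, hd]

lemma pvPathEndB_eq (tokens : List (List String)) :
    pvPathEndB tokens = pvPathA tokens (tokens.length - 1) := by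
  unfold pvPathEndB
  rw [pvTriples_eq, List.foldl_map]
  rcases Nat.lt_or_ge tokens.length 2 with hs | hn
  · rw [show tokens.length - 2 = 0 from by omega]
    rcases Nat.lt_or_ge tokens.length 1 with h0 | h1
    · rw [show tokens.length - 1 = 0 from by omega]
      rfl
    · rw [show tokens.length - 1 = 0 from by omega]
      rfl
  · rw [pvPathEnd_aux tokens (tokens.length - 2) (by omega) hn,
      show tokens.length - 2 + 1 = tokens.length - 1 from by omega]

lemma pvD_iff (tokens : List (List String)) :
    D_tokens_to_condition tokens ↔
      (pvLastFireB tokens = true ∧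
       (pvTok tokens (tokens.length - 1) ≠ "" ∨ pvPathA tokens (tokens.length - 1) = true)) := by
  unfold D_tokens_to_condition pvLastFireB
  constructor
  · rintro ⟨hn, hw, hd, hst, hdisj⟩
    rw [pvWordB_eq_plain] at hw
    refine ⟨?_, ?_⟩
    · simp only [Bool.and_eq_true, decide_eq_true_eq, beq_iff_eq]
      exact ⟨⟨⟨hn, hw⟩, hd⟩, (pvStaleVal_brace tokens (by omega)).mp hst⟩
    · cases hdisj with
      | inl h => exact Or.inl h
      | inr h => exact Or.inr (by rw [← pvPathEndB_eq tokens]; exact h)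
  · rintro ⟨hLF, hdisj⟩
    obtain ⟨hn2, hplast, hprevd, hstale⟩ := pvLF_parts tokens hLF
    refine ⟨hn2, by rw [pvWordB_eq_plain]; exact hplast, hprevd,
      (pvStaleVal_brace tokens (by omega)).mpr hstale, ?_⟩
    cases hdisj with
    | inl h => exact Or.inl h
    | inr h => exact Or.inr (by rw [pvPathEndB_eq tokens]; exact h)

-- ===== VERDICT (by name: the statement is the Claim_ definition above) =====
theorem tokens_to_condition_spec : Claim_unchanged_tokens_to_condition := by
  intro tokens _ _ hD
  have h := pvMain tokens tokens.length 0 none none false (by omega) (fun _ => rfl) rfl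
    (fun _ => rfl) (Or.inl rfl)
  unfold tokens_to_condition tokens_to_condition_alt
  rw [pvJoin_eq, pvJoin_eq]
  by_cases hLF : pvLastFireB tokens = true
  · by_cases hn : 0 < tokens.length
    · rw [if_pos ⟨hLF, hn⟩] at h
      obtain ⟨s, hA, hB⟩ := h
      have hD' : pvTok tokens (tokens.length - 1) = "" ∧ pvPathA tokens (tokens.length - 1) = false := by
        by_contra hc
        apply hD
        rw [pvD_iff]
        refine ⟨hLF, ?_⟩
        by_cases he : pvTok tokens (tokens.length - 1) = ""
        · right
          by_contra hp
          exact hc ⟨he, by simpa using hp⟩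
        · exact Or.inl he
      have heA : pvEndA tokens = [] := by
        unfold pvEndA
        rw [hD'.1]
        rfl
      have heB : pvEndB tokens = [] := by
        unfold pvEndB
        rw [hD'.2, if_neg (by simp), hD'.1]
        rfl
      rw [heA, List.append_nil] at hA
      rw [heB, List.append_nil] at hB
      rw [hA, hB]
    · have h0 : tokens.length = 0 := by omega
      rw [if_neg (fun hc => hn hc.2)] at h
      rw [h]
  · rw [if_neg (fun hc => hLF hc.1)] at h
    rw [h]

theorem tokens_to_condition_changed : Claim_changed_tokens_to_condition := by
  unfold Claim_changed_tokens_to_condition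
  decide

theorem tokens_to_condition_tight : Claim_exact_tokens_to_condition := by
  intro tokens _ _ hD heq
  obtain ⟨hLF, hdisj⟩ := (pvD_iff tokens).mp hD
  obtain ⟨hn2, hplast, hprevd, hstale⟩ := pvLF_parts tokens hLF
  have h := pvMain tokens tokens.length 0 none none false (by omega) (fun _ => rfl) rfl
    (fun _ => rfl) (Or.inl rfl)
  rw [if_pos ⟨hLF, by omega⟩] at h
  obtain ⟨s, hA, hB⟩ := h
  unfold tokens_to_condition tokens_to_condition_alt at heq
  rw [pvJoin_eq, pvJoin_eq] at heq
  have hlist := congrArg String.toList heq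
  rw [String.toList_ofList, String.toList_ofList, hA, hB] at hlist
  have hend : pvEndA tokens = pvEndB tokens := List.append_cancel_left hlist
  cases hpre : pvPrefix? (pvTok tokens (tokens.length - 1)) with
  | none =>
    have hA0 : pvEndA tokens = [] := by unfold pvEndA; rw [hpre]; rfl
    have hB0 : pvEndB tokens = [] := by rw [← hend, hA0]
    unfold pvEndB at hB0
    by_cases hp : pvPathA tokens (tokens.length - 1) = true
    · rw [if_pos hp, String.toList_append, String.toList_append] at hB0
      rw [show "['".toList = ['[', '\''] from rfl] at hB0
      simp at hB0
    · have hnn : pvTok tokens (tokens.length - 1) ≠ "" := by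
        cases hdisj with
        | inl h => exact h
        | inr h => exact absurd h hp
      rw [if_neg (by simpa using hp)] at hB0
      exact hnn (String.toList_eq_nil_iff.mp hB0)
  | some pre =>
    unfold pvEndA at hend
    rw [hpre] at hend
    unfold pvEndB at hend
    unfold pvPrefix? at hpre
    split_ifs at hpre with h1 h2 h3 h4
    · rw [show pvTok tokens (tokens.length - 1) = "c" from by simpa using h1] at hend
      by_cases hp : pvPathA tokens (tokens.length - 1) = true
      · rw [if_pos hp] at hend
        injection hpre with hpe
        rw [← hpe] at hend
        simp [pvJ] at hend
      · rw [if_neg (by simpa using hp)] at hend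
        injection hpre with hpe
        rw [← hpe] at hend
        simp [pvJ] at hend
    · rw [show pvTok tokens (tokens.length - 1) = "i" from by simpa using h2] at hend
      by_cases hp : pvPathA tokens (tokens.length - 1) = true
      · rw [if_pos hp] at hend
        injection hpre with hpe
        rw [← hpe] at hend
        simp [pvJ] at hend
      · rw [if_neg (by simpa using hp)] at hend
        injection hpre with hpe
        rw [← hpe] at hend
        simp [pvJ] at hend
    · rw [show pvTok tokens (tokens.length - 1) = "d" from by simpa using h3] at hend
      by_cases hp : pvPathA tokens (tokens.length - 1) = true
      · rw [if_pos hp] at hend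
        injection hpre with hpe
        rw [← hpe] at hend
        simp [pvJ] at hend
      · rw [if_neg (by simpa using hp)] at hend
        injection hpre with hpe
        rw [← hpe] at hend
        simp [pvJ] at hend
    · rw [show pvTok tokens (tokens.length - 1) = "p" from by simpa using h4] at hend
      by_cases hp : pvPathA tokens (tokens.length - 1) = true
      · rw [if_pos hp] at hend
        injection hpre with hpe
        rw [← hpe] at hend
        simp [pvJ] at hend
      · rw [if_neg (by simpa using hp)] at hend
        injection hpre with hpe
        rw [← hpe] at hend
        simp [pvJ] at hend
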